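-- pv_equiv track=rewrite | github.com/kbuchik/Advent-of-Code-2023 | 02_cube_conundrum.py | checkCubes
-- ===== SOURCE A (Python) =====
-- RED_LIMIT = 12
--
-- GREEN_LIMIT = 13
--
-- BLUE_LIMIT = 14
--
-- def checkCubes(g):
--     counts = {'red': 0, 'green': 0, 'blue': 0}
--     g = g.split(', ')
--     for color in g:
--         color = color.split(' ')
--         if color[1] not in ['red', 'green', 'blue']:
--             continue
--         counts[color[1]] += int(color[0])
--     return (counts['red'] <= RED_LIMIT) and (counts['green'] <= GREEN_LIMIT) and (counts['blue'] <= BLUE_LIMIT)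
-- ===== SOURCE B (Python) =====
-- def checkCubes(g):
--     tokens = [t.split(' ') for t in g.split(', ')]
--     red = sum(int(c[0]) for c in tokens if c[1] == 'red')
--     green = sum(int(c[0]) for c in tokens if c[1] == 'green')
--     blue = sum(int(c[0]) for c in tokens if c[1] == 'blue')
--     return red <= 12 and green <= 13 and blue <= 14
-- ===== Notes on version B (the rewrite author's own statement) =====
-- stated objective: alternative
-- what changed: Replaces the single dict-accumulating pass over the tokens with one tokenisation pass followed by three independent filtered sums (one per color), compared directly against the limits.
import Mathlib
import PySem

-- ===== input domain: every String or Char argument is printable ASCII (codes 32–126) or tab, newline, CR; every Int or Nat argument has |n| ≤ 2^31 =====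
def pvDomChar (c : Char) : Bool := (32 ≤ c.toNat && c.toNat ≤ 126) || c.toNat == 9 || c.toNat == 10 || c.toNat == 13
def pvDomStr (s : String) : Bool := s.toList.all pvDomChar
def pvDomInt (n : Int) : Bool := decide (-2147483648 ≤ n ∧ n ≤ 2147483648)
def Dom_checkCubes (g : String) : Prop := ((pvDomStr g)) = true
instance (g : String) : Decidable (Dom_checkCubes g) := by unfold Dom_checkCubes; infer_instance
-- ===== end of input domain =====

-- B replaces A's single dict-accumulating pass with three independent filtered sums, one per color (alternative decomposition, same cost).

-- ===== PORT A =====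
def checkCubes (g : String) : Bool :=
  let counts : PySem.Dict String Int :=
    PySem.Dict.ofList [("red", 0), ("green", 0), ("blue", 0)]
  let gs := (PySem.Str.split? g ", ").getD []
  let counts := gs.foldl (fun d color =>
    let parts := (PySem.Str.split? color " ").getD []
    -- color[1] / int(color[0]): pyGetD/(ofStr? _).getD total forms, exact under Pre_
    let c1 := PySem.List.pyGetD parts 1 ""
    if c1 ∈ ["red", "green", "blue"] then
      d.modify c1 0 (· + (PySem.Int.ofStr? (PySem.List.pyGetD parts 0 "")).getD 0)
    else d) counts
  (counts.getD "red" 0 ≤ 12) && (counts.getD "green" 0 ≤ 13) && (counts.getD "blue" 0 ≤ 14)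

-- ===== PORT B =====
def checkCubes_alt (g : String) : Bool :=
  let tokens := ((PySem.Str.split? g ", ").getD []).map (fun t => (PySem.Str.split? t " ").getD [])
  let red := ((tokens.filter (fun c => PySem.List.pyGetD c 1 "" == "red")).foldl
    (fun s c => s + (PySem.Int.ofStr? (PySem.List.pyGetD c 0 "")).getD 0) 0)
  let green := ((tokens.filter (fun c => PySem.List.pyGetD c 1 "" == "green")).foldl
    (fun s c => s + (PySem.Int.ofStr? (PySem.List.pyGetD c 0 "")).getD 0) 0)
  let blue := ((tokens.filter (fun c => PySem.List.pyGetD c 1 "" == "blue")).foldl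
    (fun s c => s + (PySem.Int.ofStr? (PySem.List.pyGetD c 0 "")).getD 0) 0)
  (red ≤ 12) && (green ≤ 13) && (blue ≤ 14)

-- ===== PRECONDITION & SPEC =====
-- Pre_ excludes exactly the inputs where the Python A raises: a token without a second
-- space-separated field (IndexError) or a matched color whose count is not an int (ValueError).
def Pre_checkCubes (g : String) : Prop :=
  ∀ t ∈ (PySem.Str.split? g ", ").getD [],
    2 ≤ ((PySem.Str.split? t " ").getD []).length ∧
    (PySem.List.pyGetD ((PySem.Str.split? t " ").getD []) 1 "" ∈ ["red", "green", "blue"] →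
      (PySem.Int.ofStr? (PySem.List.pyGetD ((PySem.Str.split? t " ").getD []) 0 "")).isSome = true)
instance (g : String) : Decidable (Pre_checkCubes g) := by unfold Pre_checkCubes; infer_instance

def pvWitness_checkCubes : String := "3 red, 2 green, 14 blue"

def Spec_checkCubes (g : String) (out : Bool) : Prop := out = checkCubes_alt g
instance (g : String) (out : Bool) : Decidable (Spec_checkCubes g out) := by unfold Spec_checkCubes; infer_instance

-- ===== CLAIM (what is proved, stated in full; the proofs are below) =====
def Claim_equal_checkCubes : Prop := ∀ (g : String), Dom_checkCubes g → Pre_checkCubes g → Spec_checkCubes g (checkCubes g)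

-- ===== LEMMAS AND PROOFS =====

-- A's dict-accumulating fold over the raw tokens, read off at one of the three
-- pre-inserted keys, is the initial entry plus the sum of the matched counts.
theorem pv_fold_getD (L : List String) (d : PySem.Dict String Int) (k : String)
    (hk : k ∈ (["red", "green", "blue"] : List String)) :
    (L.foldl (fun d color =>
      let parts := (PySem.Str.split? color " ").getD []
      let c1 := PySem.List.pyGetD parts 1 ""
      if c1 ∈ (["red", "green", "blue"] : List String) then
        d.modify c1 0 (· + (PySem.Int.ofStr? (PySem.List.pyGetD parts 0 "")).getD 0)
      else d) d).getD k 0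
    = d.getD k 0 +
      (((L.map (fun t => (PySem.Str.split? t " ").getD [])).filter
          (fun c => PySem.List.pyGetD c 1 "" == k)).map
        (fun c => (PySem.Int.ofStr? (PySem.List.pyGetD c 0 "")).getD 0)).sum := by
  induction L generalizing d with
  | nil => simp
  | cons t L ih =>
    simp only [List.foldl_cons, List.map_cons, List.filter_cons]
    by_cases hck : PySem.List.pyGetD ((PySem.Str.split? t " ").getD []) 1 "" = k
    · rw [hck]
      rw [if_pos hk, ih, PySem.Dict.getD_modify_self]
      simp only [beq_self_eq_true, if_pos, List.map_cons, List.sum_cons]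
      ring
    · have hb : (PySem.List.pyGetD ((PySem.Str.split? t " ").getD []) 1 "" == k) = false := by
        simp [hck]
      rw [hb]
      simp only [Bool.false_eq_true, if_false]
      by_cases hmem : PySem.List.pyGetD ((PySem.Str.split? t " ").getD []) 1 ""
          ∈ (["red", "green", "blue"] : List String)
      · rw [if_pos hmem, ih, PySem.Dict.getD_modify_of_ne _ _ _ (Ne.symm hck)]
      · rw [if_neg hmem, ih]

theorem pv_main (g : String) : checkCubes g = checkCubes_alt g := by
  simp only [checkCubes, checkCubes_alt]
  rw [pv_fold_getD _ _ "red" (by simp), pv_fold_getD _ _ "green" (by simp),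
    pv_fold_getD _ _ "blue" (by simp),
    PySem.List.foldl_add, PySem.List.foldl_add, PySem.List.foldl_add]
  have hr : (PySem.Dict.ofList [("red", (0 : Int)), ("green", 0), ("blue", 0)]).getD "red" 0 = 0 := by rfl
  have hg : (PySem.Dict.ofList [("red", (0 : Int)), ("green", 0), ("blue", 0)]).getD "green" 0 = 0 := by rfl
  have hb : (PySem.Dict.ofList [("red", (0 : Int)), ("green", 0), ("blue", 0)]).getD "blue" 0 = 0 := by rfl
  rw [hr, hg, hb]

-- ===== VERDICT (by name: the statement is the Claim_ definition above) =====
theorem checkCubes_spec : Claim_equal_checkCubes := by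
  intro g _ _
  exact pv_main g
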